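-- pv_equiv track=rewrite | github.com/day-after-tomorrow/Europe-insights | fetch_intelligence 3.py | merge_feeds
-- ===== SOURCE A (Python) =====
-- BASE_FEEDS = [
--     "competitor","jobs","ma","market","regulatory",
--     "tenders","standards","investments","emerging","esg",
-- ]
--
-- MAX_PER_FEED = 8
--
-- def merge_feeds(raw_feeds: dict) -> dict:
--     merged = {f: [] for f in BASE_FEEDS}
--     rank   = {"high":0,"medium":1,"low":2}
--     for key, items in raw_feeds.items():
--         base = key.rstrip("0123456789").replace("_local","")
--         if base in merged:
--             merged[base].extend(items)
--     for base in merged: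
--         seen, unique = set(), []
--         for item in merged[base]:
--             disp = (item.get("titleEN") or item["title"]).lower()[:55]
--             if disp not in seen:
--                 seen.add(disp)
--                 unique.append(item)
--         unique.sort(key=lambda x: rank.get(x["urgency"],2))
--         merged[base] = unique[:MAX_PER_FEED]
--     return merged
-- ===== SOURCE B (Python) =====
-- BASE_FEEDS = [
--     "competitor","jobs","ma","market","regulatory",
--     "tenders","standards","investments","emerging","esg",
-- ]
--
-- MAX_PER_FEED = 8
--
-- def merge_feeds(raw_feeds: dict) -> dict:
--     rank = {"high": 0, "medium": 1, "low": 2}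
--     groups = {f: [] for f in BASE_FEEDS}
--     for key, items in raw_feeds.items():
--         base = key.rstrip("0123456789").replace("_local", "")
--         if base in groups:
--             groups[base].extend(items)
--     merged = {}
--     for base, items in groups.items():
--         seen = set()
--         buckets = ([], [], [])
--         for item in items:
--             disp = (item.get("titleEN") or item["title"]).lower()[:55]
--             if disp not in seen:
--                 seen.add(disp)
--                 buckets[rank.get(item["urgency"], 2)].append(item)
--         merged[base] = (buckets[0] + buckets[1] + buckets[2])[:MAX_PER_FEED]
--     return merged
-- ===== Notes on version B (the rewrite author's own statement) =====
-- stated objective: alternative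
-- what changed: The per-feed stable sort by urgency rank is replaced by a three-bucket counting pass fused into the dedup loop: each kept item is appended to the high/medium/low bucket of its rank and the buckets are concatenated, so no sort happens at all.
import Mathlib
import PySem

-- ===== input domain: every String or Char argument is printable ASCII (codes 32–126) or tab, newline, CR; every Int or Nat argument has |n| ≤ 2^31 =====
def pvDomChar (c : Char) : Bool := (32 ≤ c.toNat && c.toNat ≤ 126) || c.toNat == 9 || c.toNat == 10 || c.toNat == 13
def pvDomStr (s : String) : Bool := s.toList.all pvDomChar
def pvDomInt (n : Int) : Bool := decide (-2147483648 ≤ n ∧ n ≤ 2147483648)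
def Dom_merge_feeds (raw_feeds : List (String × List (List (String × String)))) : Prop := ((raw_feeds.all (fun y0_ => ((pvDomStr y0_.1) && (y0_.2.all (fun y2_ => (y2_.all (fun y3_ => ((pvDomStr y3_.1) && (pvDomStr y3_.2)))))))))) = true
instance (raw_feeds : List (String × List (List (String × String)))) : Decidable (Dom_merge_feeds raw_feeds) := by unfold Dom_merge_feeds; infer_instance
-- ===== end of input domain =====

-- B replaces A's per-feed stable sort by urgency rank with a three-bucket counting pass
-- fused into the dedup loop (alternative algorithm; same results, no sort).

abbrev pvItem : Type := List (String × String)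

-- shared module constants / line-identical expressions of both Python sources
def pvBASE_FEEDS : List String :=
  ["competitor","jobs","ma","market","regulatory",
   "tenders","standards","investments","emerging","esg"]

def pvMAX_PER_FEED : Int := 8

-- key.rstrip("0123456789").replace("_local",""): hand port of rstrip(chars) — exact:
-- it removes exactly the trailing characters belonging to the set '0'..'9'.
def pvBase (key : String) : String :=
  PySem.Str.replace
    (String.ofList ((key.toList.reverse.dropWhile (fun c => decide ('0' ≤ c ∧ c ≤ '9'))).reverse))
    "_local" ""

-- (item.get("titleEN") or item["title"]).lower()[:55]; the .getD "" branch is the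
-- KeyError case, excluded by Pre_ (item dicts looked up first-match per the convention)
def pvDisp (item : pvItem) : String :=
  let t : String :=
    match item.lookup "titleEN" with
    | some s => if s = "" then (item.lookup "title").getD "" else s
    | none   => (item.lookup "title").getD ""
  PySem.Str.slice (PySem.Str.lower t) none (some 55)

-- rank.get(item["urgency"], 2); missing "urgency" is a KeyError, excluded by Pre_
def pvRankOf (item : pvItem) : Nat :=
  let u := (item.lookup "urgency").getD ""
  if u == "high" then 0 else if u == "medium" then 1 else 2

-- buckets[rank.get(item["urgency"], 2)].append(item): the three-way tuple indexing of B
def pvBucket (item : pvItem) (b : List pvItem × List pvItem × List pvItem) :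
    List pvItem × List pvItem × List pvItem :=
  match pvRankOf item with
  | 0 => (b.1 ++ [item], b.2.1, b.2.2)
  | 1 => (b.1, b.2.1 ++ [item], b.2.2)
  | _ => (b.1, b.2.1, b.2.2 ++ [item])

-- the grouping loop, line-identical in A and B:
-- merged = {f: [] for f in BASE_FEEDS}; for key, items: if base in merged: merged[base].extend(items)
def pvGroup (raw_feeds : List (String × List pvItem)) : PySem.Dict String (List pvItem) :=
  raw_feeds.foldl
    (fun d kv =>
      let base := pvBase kv.1
      if d.contains base then d.modify base [] (· ++ kv.2) else d)
    (PySem.Dict.ofList (pvBASE_FEEDS.map (fun f => (f, []))))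

-- ===== PORT A =====
def merge_feeds (raw_feeds : List (String × List (List (String × String)))) : List (String × List (List (String × String))) :=
  let merged := pvGroup raw_feeds
  (merged.keys.foldl
    (fun d base =>
      let st := (d.getD base []).foldl
        (fun (st : PySem.Set String × List pvItem) item =>
          let disp := pvDisp item
          if st.1.contains disp then st else (PySem.Set.add st.1 disp, st.2 ++ [item]))
        (PySem.Set.empty, [])
      d.insert base (PySem.List.slice (PySem.List.sorted st.2 pvRankOf) none (some pvMAX_PER_FEED)))
    merged).items

-- ===== PORT B =====
def merge_feeds_alt (raw_feeds : List (String × List (List (String × String)))) : List (String × List (List (String × String))) :=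
  let groups := pvGroup raw_feeds
  groups.items.foldl
    (fun acc p =>
      let st := p.2.foldl
        (fun (st : PySem.Set String × (List pvItem × List pvItem × List pvItem)) item =>
          let disp := pvDisp item
          if st.1.contains disp then st
          else (PySem.Set.add st.1 disp, pvBucket item st.2))
        (PySem.Set.empty, ([], [], []))
      acc ++ [(p.1, PySem.List.slice (st.2.1 ++ st.2.2.1 ++ st.2.2.2) none (some pvMAX_PER_FEED))])
    []

-- ===== PRECONDITION & SPEC =====
-- Pre_ excludes exactly the inputs where Python A raises KeyError: an item of a feed whose
-- base lands in BASE_FEEDS lacking "urgency", or lacking "title" while "titleEN" is missing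
-- or empty; it also requires unique keys in each association list, since they encode dicts.
def Pre_merge_feeds (raw_feeds : List (String × List (List (String × String)))) : Prop :=
  (raw_feeds.map Prod.fst).Nodup ∧
  ∀ p ∈ raw_feeds, ∀ item ∈ p.2,
    (item.map Prod.fst).Nodup ∧
    (pvBase p.1 ∈ pvBASE_FEEDS →
      (item.lookup "urgency").isSome = true ∧
      ((item.lookup "titleEN").getD "" ≠ "" ∨ (item.lookup "title").isSome = true))
instance (raw_feeds : List (String × List (List (String × String)))) : Decidable (Pre_merge_feeds raw_feeds) := by unfold Pre_merge_feeds; infer_instance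

def pvWitness_merge_feeds : (List (String × List (List (String × String)))) :=
  [("jobs", [[("title", "Opening"), ("urgency", "high")]])]

def Spec_merge_feeds (raw_feeds : List (String × List (List (String × String)))) (out : List (String × List (List (String × String)))) : Prop := out = merge_feeds_alt raw_feeds
instance (raw_feeds : List (String × List (List (String × String)))) (out : List (String × List (List (String × String)))) : Decidable (Spec_merge_feeds raw_feeds out) := by unfold Spec_merge_feeds; infer_instance

-- ===== CLAIM (what is proved, stated in full; the proofs are below) =====
def Claim_equal_merge_feeds : Prop := ∀ (raw_feeds : List (String × List (List (String × String)))), Dom_merge_feeds raw_feeds → Pre_merge_feeds raw_feeds → Spec_merge_feeds raw_feeds (merge_feeds raw_feeds)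

-- ===== LEMMAS AND PROOFS =====

-- the deduplicated sublist (both loops keep the first item of each display key)
def pvUniq (s : PySem.Set String) : List pvItem → List pvItem
  | [] => []
  | i :: t =>
    if (PySem.Set.contains s (pvDisp i)) = true then pvUniq s t
    else i :: pvUniq (PySem.Set.add s (pvDisp i)) t

lemma foldA_eq_uniq (its : List pvItem) :
    ∀ (s : PySem.Set String) (acc : List pvItem),
    (its.foldl
      (fun (st : PySem.Set String × List pvItem) item =>
        let disp := pvDisp item
        if st.1.contains disp then st else (PySem.Set.add st.1 disp, st.2 ++ [item]))
      (s, acc)).2 = acc ++ pvUniq s its := by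
  induction its with
  | nil => intro s acc; simp [pvUniq]
  | cons i t ih =>
    intro s acc
    by_cases hm : pvDisp i ∈ s
    · have hc : PySem.Set.contains s (pvDisp i) = true := by simpa using hm
      rw [List.foldl_cons]
      simp only [hc, reduceIte]
      rw [ih]
      simp [pvUniq, hm]
    · have hc : PySem.Set.contains s (pvDisp i) = false := by simpa using hm
      rw [List.foldl_cons]
      simp only [hc, Bool.false_eq_true, reduceIte]
      rw [ih]
      simp [pvUniq, hm]

lemma pvRankOf_le (i : pvItem) : pvRankOf i ≤ 2 := by
  unfold pvRankOf; dsimp only; split_ifs <;> omega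

lemma foldB_eq_uniq_filter (its : List pvItem) :
    ∀ (s : PySem.Set String) (b0 b1 b2 : List pvItem),
    (its.foldl
      (fun (st : PySem.Set String × (List pvItem × List pvItem × List pvItem)) item =>
        let disp := pvDisp item
        if st.1.contains disp then st
        else (PySem.Set.add st.1 disp, pvBucket item st.2))
      (s, (b0, b1, b2))).2 =
    (b0 ++ (pvUniq s its).filter (fun i => pvRankOf i == 0),
     b1 ++ (pvUniq s its).filter (fun i => pvRankOf i == 1),
     b2 ++ (pvUniq s its).filter (fun i => pvRankOf i == 2)) := by
  induction its with
  | nil => intro s b0 b1 b2; simp [pvUniq]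
  | cons i t ih =>
    intro s b0 b1 b2
    by_cases hm : pvDisp i ∈ s
    · have hc : PySem.Set.contains s (pvDisp i) = true := by simpa using hm
      rw [List.foldl_cons]
      simp only [hc, reduceIte]
      rw [ih]
      simp [pvUniq, hm]
    · have hc : PySem.Set.contains s (pvDisp i) = false := by simpa using hm
      rw [List.foldl_cons]
      simp only [hc, Bool.false_eq_true, reduceIte]
      rcases hr : pvRankOf i with _ | n
      · rw [show pvBucket i (b0, b1, b2) = (b0 ++ [i], b1, b2) from by simp [pvBucket, hr]]
        rw [ih]
        simp [pvUniq, hm, hr]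
      · rcases n with _ | m
        · rw [show pvBucket i (b0, b1, b2) = (b0, b1 ++ [i], b2) from by simp [pvBucket, hr]]
          rw [ih]
          simp [pvUniq, hm, hr]
        · rw [show pvBucket i (b0, b1, b2) = (b0, b1, b2 ++ [i]) from by simp [pvBucket, hr]]
          rw [ih]
          have h2 : pvRankOf i = 2 := by have := pvRankOf_le i; rw [hr]; omega
          simp [pvUniq, hm, h2]

lemma insertBy_split (before : pvItem → pvItem → Bool) (x : pvItem) (as bs : List pvItem)
    (ha : ∀ a ∈ as, before x a = false) (hb : ∀ b ∈ bs, before x b = true) :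
    PySem.List.insertBy before x (as ++ bs) = as ++ x :: bs := by
  induction as with
  | nil =>
    cases bs with
    | nil => simp [PySem.List.insertBy]
    | cons b bs' => simp [PySem.List.insertBy, hb b (by simp)]
  | cons a as' ih =>
    have hfa : before x a = false := ha a (by simp)
    simp only [List.cons_append, PySem.List.insertBy, hfa]
    simp only [Bool.false_eq_true, if_false, List.cons.injEq, true_and]
    exact ih (fun a' h' => ha a' (by simp [h']))

lemma sorted_eq_buckets (l : List pvItem) :
    PySem.List.sorted l pvRankOf =
      l.filter (fun i => pvRankOf i == 0) ++ l.filter (fun i => pvRankOf i == 1) ++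
      l.filter (fun i => pvRankOf i == 2) := by
  rw [PySem.List.sorted_eq_foldl_insertBy]
  induction l using List.reverseRecOn with
  | nil => simp
  | append_singleton l x ih =>
    rw [List.foldl_append, List.foldl_cons, List.foldl_nil, ih]
    have hx := pvRankOf_le x
    simp only [List.filter_append, List.filter_cons, List.filter_nil]
    interval_cases hr : (pvRankOf x)
    · rw [List.append_assoc, insertBy_split _ x _ _
        (by intro a hha; simp only [List.mem_filter, beq_iff_eq] at hha
            simp [hr, hha.2])
        (by intro b hhb; simp only [List.mem_append, List.mem_filter, beq_iff_eq] at hhb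
            rcases hhb with h1 | h2
            · simp [hr, h1.2]
            · simp [hr, h2.2])]
      simp
    · rw [show (l.filter (fun i => pvRankOf i == 0) ++ l.filter (fun i => pvRankOf i == 1) ++
            l.filter (fun i => pvRankOf i == 2)) =
          ((l.filter (fun i => pvRankOf i == 0) ++ l.filter (fun i => pvRankOf i == 1)) ++
            l.filter (fun i => pvRankOf i == 2)) from by simp,
        insertBy_split _ x _ _
        (by intro a hha; simp only [List.mem_append, List.mem_filter, beq_iff_eq] at hha
            rcases hha with h1 | h2
            · simp [hr, h1.2]
            · simp [hr, h2.2])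
        (by intro b hhb; simp only [List.mem_filter, beq_iff_eq] at hhb
            simp [hr, hhb.2])]
      simp
    · rw [show (l.filter (fun i => pvRankOf i == 0) ++ l.filter (fun i => pvRankOf i == 1) ++
            l.filter (fun i => pvRankOf i == 2)) =
          ((l.filter (fun i => pvRankOf i == 0) ++ l.filter (fun i => pvRankOf i == 1) ++
            l.filter (fun i => pvRankOf i == 2)) ++ []) from by simp,
        insertBy_split _ x _ _
        (by intro a hha; simp only [List.mem_append, List.mem_filter, beq_iff_eq] at hha
            rcases hha with (h1 | h2) | h3
            · simp [hr, h1.2]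
            · simp [hr, h2.2]
            · simp [hr, h3.2])
        (by intro b hhb; simp at hhb)]
      simp

-- keys are preserved through the grouping loop and the second loop's in-place overwrites
lemma keys_insert_of_contains (d : PySem.Dict String (List pvItem)) (k : String)
    (v : List pvItem) (h : d.contains k = true) : (d.insert k v).keys = d.keys := by
  simp only [PySem.Dict.insert, h, if_true, PySem.Dict.keys, List.map_map]
  apply List.map_congr_left
  intro p _
  by_cases hp : (p.1 == k) = true
  · simp [Function.comp, hp]; exact ((beq_iff_eq).mp hp).symm
  · simp [Function.comp, hp]

lemma keys_pvGroup (raw : List (String × List pvItem)) :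
    (pvGroup raw).keys = pvBASE_FEEDS := by
  unfold pvGroup
  have base : (PySem.Dict.ofList (pvBASE_FEEDS.map (fun f => (f, ([] : List pvItem))))).keys
      = pvBASE_FEEDS := by decide
  suffices h : ∀ (l : List (String × List pvItem)) (d : PySem.Dict String (List pvItem)),
      (l.foldl (fun d kv =>
        let base := pvBase kv.1
        if d.contains base then d.modify base [] (· ++ kv.2) else d) d).keys = d.keys by
    rw [h, base]
  intro l
  induction l with
  | nil => intro d; simp
  | cons kv t ih =>
    intro d
    dsimp only [List.foldl_cons]
    by_cases hc : d.contains (pvBase kv.1) = true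
    · rw [ih]
      simp only [hc, if_true, PySem.Dict.modify]
      exact keys_insert_of_contains _ _ _ (by
        simpa using hc)
    · simp only [Bool.not_eq_true] at hc
      simp [hc, ih]

-- A's second loop: folding "d[b] = f(d[b])" over the (Nodup) keys of d maps f over the values
lemma loop_insert_items (f : List pvItem → List pvItem) :
    ∀ (post pre : List (String × List pvItem)),
    ((pre ++ post).map Prod.fst).Nodup →
    ((post.map Prod.fst).foldl
      (fun d b => d.insert b (f (d.getD b []))) (PySem.Dict.mk (pre ++ post))).items
      = pre ++ post.map (fun p => (p.1, f p.2)) := by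
  intro post
  induction post with
  | nil => intro pre _; simp
  | cons p t ih =>
    intro pre hnd
    have hdp : ∀ a ∈ List.map Prod.fst pre, ∀ b ∈ List.map Prod.fst (p :: t), a ≠ b := by
      have h := hnd
      rw [List.map_append] at h
      exact (List.nodup_append.mp h).2.2
    have hk1 : p.1 ∉ pre.map Prod.fst := by
      intro hm
      exact hdp p.1 hm p.1 (by simp) rfl
    have hk2 : p.1 ∉ t.map Prod.fst := by
      have h := hnd
      rw [List.map_append] at h
      have := (List.nodup_append.mp h).2.1
      rw [List.map_cons, List.nodup_cons] at this
      exact this.1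
    have hpre : pre.find? (fun q => q.1 == p.1) = none := by
      rw [List.find?_eq_none]
      intro q hq
      simp only [beq_iff_eq]
      intro he
      exact hk1 (he ▸ List.mem_map_of_mem hq)
    have hget : (PySem.Dict.mk (pre ++ p :: t)).getD p.1 [] = p.2 := by
      simp [PySem.Dict.getD, PySem.Dict.get?, List.find?_append, hpre]
    have hcont : (PySem.Dict.mk (pre ++ p :: t)).contains p.1 = true := by
      simp [PySem.Dict.contains]
    have hmapid : ∀ (l : List (String × List pvItem)), p.1 ∉ l.map Prod.fst →
        l.map (fun q => if (q.1 == p.1) = true then (p.1, f p.2) else q) = l := by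
      intro l hl
      rw [List.map_congr_left (g := id) ?_, List.map_id]
      intro q hq
      have : (q.1 == p.1) = false := by
        rw [beq_eq_false_iff_ne]
        intro he
        exact hl (he ▸ List.mem_map_of_mem hq)
      simp [this]
    have hins : (PySem.Dict.mk (pre ++ p :: t)).insert p.1 (f p.2)
        = PySem.Dict.mk ((pre ++ [(p.1, f p.2)]) ++ t) := by
      simp only [PySem.Dict.insert, hcont, if_true]
      congr 1
      simp only [List.map_append, List.map_cons, beq_self_eq_true, if_true,
        hmapid pre hk1, hmapid t hk2]
      simp
    calc ((((p :: t).map Prod.fst).foldl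
            (fun d b => d.insert b (f (d.getD b []))) (PySem.Dict.mk (pre ++ p :: t))).items)
        = ((t.map Prod.fst).foldl (fun d b => d.insert b (f (d.getD b [])))
            (PySem.Dict.mk ((pre ++ [(p.1, f p.2)]) ++ t))).items := by
          simp only [List.map_cons, List.foldl_cons, hget, hins]
      _ = (pre ++ [(p.1, f p.2)]) ++ t.map (fun q => (q.1, f q.2)) := by
          apply ih
          simpa using hnd
      _ = pre ++ (p :: t).map (fun q => (q.1, f q.2)) := by simp

-- proof-only abbreviations for the two per-feed value transformations
def pvFA (its : List pvItem) : List pvItem :=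
  PySem.List.slice
    (PySem.List.sorted
      ((its.foldl
        (fun (st : PySem.Set String × List pvItem) item =>
          let disp := pvDisp item
          if st.1.contains disp then st else (PySem.Set.add st.1 disp, st.2 ++ [item]))
        (PySem.Set.empty, [])).2) pvRankOf) none (some pvMAX_PER_FEED)

def pvFB (its : List pvItem) : List pvItem :=
  PySem.List.slice
    ((its.foldl
        (fun (st : PySem.Set String × (List pvItem × List pvItem × List pvItem)) item =>
          let disp := pvDisp item
          if st.1.contains disp then st
          else (PySem.Set.add st.1 disp, pvBucket item st.2))
        (PySem.Set.empty, ([], [], []))).2.1 ++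
      (its.foldl
        (fun (st : PySem.Set String × (List pvItem × List pvItem × List pvItem)) item =>
          let disp := pvDisp item
          if st.1.contains disp then st
          else (PySem.Set.add st.1 disp, pvBucket item st.2))
        (PySem.Set.empty, ([], [], []))).2.2.1 ++
      (its.foldl
        (fun (st : PySem.Set String × (List pvItem × List pvItem × List pvItem)) item =>
          let disp := pvDisp item
          if st.1.contains disp then st
          else (PySem.Set.add st.1 disp, pvBucket item st.2))
        (PySem.Set.empty, ([], [], []))).2.2.2) none (some pvMAX_PER_FEED)

lemma pvFA_eq_pvFB (its : List pvItem) : pvFA its = pvFB its := by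
  unfold pvFA pvFB
  rw [foldA_eq_uniq, foldB_eq_uniq_filter]
  simp only [List.nil_append]
  rw [sorted_eq_buckets]

theorem merge_feeds_spec : Claim_equal_merge_feeds := by
  intro raw _ _
  unfold Spec_merge_feeds
  have ha : merge_feeds raw =
      (((pvGroup raw).items.map Prod.fst).foldl
        (fun d b => d.insert b (pvFA (d.getD b [])))
        (PySem.Dict.mk ([] ++ (pvGroup raw).items))).items := rfl
  have hb : merge_feeds_alt raw =
      (pvGroup raw).items.foldl (fun acc p => acc ++ [(p.1, pvFB p.2)]) [] := rfl
  have hkeys : (pvGroup raw).items.map Prod.fst = pvBASE_FEEDS := keys_pvGroup raw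
  have hnd : (([] ++ (pvGroup raw).items).map Prod.fst).Nodup := by
    simp only [List.nil_append, hkeys]
    decide
  rw [ha, hb, loop_insert_items pvFA ((pvGroup raw).items) [] hnd,
    PySem.List.foldl_append_singleton_eq_map
      (fun p : String × List pvItem => (p.1, pvFB p.2)) ((pvGroup raw).items) []]
  simp only [List.nil_append]
  apply List.map_congr_left
  intro p _
  rw [pvFA_eq_pvFB]
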